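-- pv_equiv track=rewrite | github.com/GFooteGK1/due-diligence-reporter | src/due_diligence_reporter/server.py | _match_building_type
-- ===== SOURCE A (Python) =====
-- _EOCCUPANCY_BUILDING_TYPES: list[tuple[int, str, list[str]]] = [
--     (100, "Current K-12 school", ["k-12", "elementary school", "middle school", "high school", "existing school"]),
--     (95, "Daycare / childcare", ["daycare", "childcare", "preschool", "pre-k"]),
--     (92, "Office 1–3 stories", [
--         "1-story office", "2-story office", "3-story office",
--         "1 story office", "2 story office", "3 story office",
--         "low-rise office", "single story office", "single-story office",
--     ]),
--     (90, "Gym / fitness center", ["gym", "fitness center", "health club", "yoga studio", "crossfit"]),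
--     (88, "Flex / light industrial (with HVAC)", [
--         "flex space", "light industrial with hvac", "warehouse office",
--         "flex industrial", "light industrial (with hvac)",
--     ]),
--     (85, "Retail strip — individual unit", ["strip mall unit", "retail unit", "individual retail"]),
--     (82, "Office — general", ["office building", "professional office", "corporate office", "general office"]),
--     (78, "Small / mid-size church", ["small church", "community church", "chapel"]),
--     (75, "Medical office / retail strip center", [
--         "medical office", "dental office", "dental", "clinic", "urgent care",
--         "retail strip center", "strip mall", "shopping center", "strip center",
--     ]),
--     (58, "Warehouse with HVAC", [
--         "warehouse with hvac", "conditioned warehouse",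
--         "climate controlled warehouse", "heated warehouse",
--     ]),
--     (55, "Small assembly venue", ["event space", "banquet hall", "small assembly", "small theater", "assembly venue"]),
--     (42, "High-rise 4–6 stories (cap)", [
--         "4-story", "5-story", "6-story", "4 story", "5 story", "6 story",
--     ]),
--     (38, "Large church / worship center", [
--         "large church", "megachurch", "cathedral", "temple", "mosque",
--         "worship center", "church",
--     ]),
--     (35, "Warehouse without HVAC", ["warehouse", "cold shell", "distribution center"]),
--     (32, "Nightclub / large bar", ["nightclub", "large bar", "night club", "lounge"]),
--     (30, "Historic / landmark building", ["historic building", "landmark", "national register", "shpo"]),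
--     (28, "Large assembly / cold storage", [
--         "theater", "concert hall", "auditorium", "cinema",
--         "cold storage", "freezer storage", "movie theater",
--     ]),
--     (25, "Data center", ["data center", "server farm"]),
--     (22, "Big box retail (100k+ SF)", ["big box", "walmart", "target", "costco", "mall anchor", "anchor store"]),
--     (20, "High-rise 7+ stories (cap)", [
--         "7-story", "8-story", "9-story", "10-story",
--         "7 story", "8 story", "9 story", "10 story",
--         "high-rise", "high rise", "skyscraper", "tower",
--     ]),
--     (18, "Hospital / nursing home", [
--         "hospital", "medical center", "surgical center", "nursing home", "assisted living",
--     ]),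
--     (15, "Bank", ["bank branch", "credit union", "bank"]),
--     (12, "Restaurant", ["restaurant", "cafe", "diner", "bistro", "grill", "food service"]),
--     (0, "Do not pursue", [
--         "gas station", "fuel station", "petroleum", "fueling station",
--         "dry cleaner", "dry clean", "perchloroethylene",
--         "auto body", "collision repair", "body shop", "paint shop",
--         "heavy manufacturing", "manufacturing plant", "industrial plant", "fabrication plant",
--         "chemical storage", "hazmat storage",
--         "mortuary", "funeral home", "crematorium",
--         "adult entertainment", "strip club",
--         "jail", "prison", "detention center", "correctional",
--     ]),
-- ]
--
-- def _match_building_type(description: str) -> tuple[int, str]: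
--     """Return (base_score, label) for a free-form building type description.
--
--     Uses longest-keyword-match so more specific terms win over generic ones
--     (e.g. "small church" beats "church").
--     """
--     desc = description.lower()
--     best_score: int | None = None
--     best_label = ""
--     best_len = 0
--
--     for score, label, keywords in _EOCCUPANCY_BUILDING_TYPES:
--         for kw in keywords:
--             if kw in desc and len(kw) > best_len:
--                 best_len = len(kw)
--                 best_score = score
--                 best_label = label
--
--     if best_score is None:
--         return 75, "Office — general (default)"
--     return best_score, best_label
-- ===== SOURCE B (Python) =====
-- # Precomputed index: _EOCCUPANCY_BUILDING_TYPES flattened to (keyword, score, label)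
-- # triples and stably sorted by descending keyword length, so the first substring
-- # match during a single early-exit scan is the longest-keyword match.
-- _FLAT_SORTED: list[tuple[str, int, str]] = [
--     ('light industrial (with hvac)', 88, 'Flex / light industrial (with HVAC)'),
--     ('climate controlled warehouse', 58, 'Warehouse with HVAC'),
--     ('light industrial with hvac', 88, 'Flex / light industrial (with HVAC)'),
--     ('conditioned warehouse', 58, 'Warehouse with HVAC'),
--     ('single story office', 92, 'Office 1–3 stories'),
--     ('single-story office', 92, 'Office 1–3 stories'),
--     ('professional office', 82, 'Office — general'),
--     ('retail strip center', 75, 'Medical office / retail strip center'),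
--     ('warehouse with hvac', 58, 'Warehouse with HVAC'),
--     ('distribution center', 35, 'Warehouse without HVAC'),
--     ('heavy manufacturing', 0, 'Do not pursue'),
--     ('manufacturing plant', 0, 'Do not pursue'),
--     ('adult entertainment', 0, 'Do not pursue'),
--     ('elementary school', 100, 'Current K-12 school'),
--     ('individual retail', 85, 'Retail strip — individual unit'),
--     ('historic building', 30, 'Historic / landmark building'),
--     ('national register', 30, 'Historic / landmark building'),
--     ('perchloroethylene', 0, 'Do not pursue'),
--     ('fabrication plant', 0, 'Do not pursue'),
--     ('warehouse office', 88, 'Flex / light industrial (with HVAC)'),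
--     ('corporate office', 82, 'Office — general'),
--     ('community church', 78, 'Small / mid-size church'),
--     ('heated warehouse', 58, 'Warehouse with HVAC'),
--     ('collision repair', 0, 'Do not pursue'),
--     ('industrial plant', 0, 'Do not pursue'),
--     ('chemical storage', 0, 'Do not pursue'),
--     ('detention center', 0, 'Do not pursue'),
--     ('existing school', 100, 'Current K-12 school'),
--     ('low-rise office', 92, 'Office 1–3 stories'),
--     ('flex industrial', 88, 'Flex / light industrial (with HVAC)'),
--     ('strip mall unit', 85, 'Retail strip — individual unit'),
--     ('office building', 82, 'Office — general'),
--     ('shopping center', 75, 'Medical office / retail strip center'),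
--     ('freezer storage', 28, 'Large assembly / cold storage'),
--     ('surgical center', 18, 'Hospital / nursing home'),
--     ('assisted living', 18, 'Hospital / nursing home'),
--     ('fueling station', 0, 'Do not pursue'),
--     ('1-story office', 92, 'Office 1–3 stories'),
--     ('2-story office', 92, 'Office 1–3 stories'),
--     ('3-story office', 92, 'Office 1–3 stories'),
--     ('1 story office', 92, 'Office 1–3 stories'),
--     ('2 story office', 92, 'Office 1–3 stories'),
--     ('3 story office', 92, 'Office 1–3 stories'),
--     ('fitness center', 90, 'Gym / fitness center'),
--     ('general office', 82, 'Office — general'),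
--     ('medical office', 75, 'Medical office / retail strip center'),
--     ('small assembly', 55, 'Small assembly venue'),
--     ('assembly venue', 55, 'Small assembly venue'),
--     ('worship center', 38, 'Large church / worship center'),
--     ('medical center', 18, 'Hospital / nursing home'),
--     ('hazmat storage', 0, 'Do not pursue'),
--     ('middle school', 100, 'Current K-12 school'),
--     ('dental office', 75, 'Medical office / retail strip center'),
--     ('small theater', 55, 'Small assembly venue'),
--     ('movie theater', 28, 'Large assembly / cold storage'),
--     ('small church', 78, 'Small / mid-size church'),
--     ('strip center', 75, 'Medical office / retail strip center'),
--     ('banquet hall', 55, 'Small assembly venue'),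
--     ('large church', 38, 'Large church / worship center'),
--     ('concert hall', 28, 'Large assembly / cold storage'),
--     ('cold storage', 28, 'Large assembly / cold storage'),
--     ('anchor store', 22, 'Big box retail (100k+ SF)'),
--     ('nursing home', 18, 'Hospital / nursing home'),
--     ('credit union', 15, 'Bank'),
--     ('food service', 12, 'Restaurant'),
--     ('fuel station', 0, 'Do not pursue'),
--     ('funeral home', 0, 'Do not pursue'),
--     ('correctional', 0, 'Do not pursue'),
--     ('high school', 100, 'Current K-12 school'),
--     ('health club', 90, 'Gym / fitness center'),
--     ('yoga studio', 90, 'Gym / fitness center'),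
--     ('retail unit', 85, 'Retail strip — individual unit'),
--     ('urgent care', 75, 'Medical office / retail strip center'),
--     ('event space', 55, 'Small assembly venue'),
--     ('data center', 25, 'Data center'),
--     ('server farm', 25, 'Data center'),
--     ('mall anchor', 22, 'Big box retail (100k+ SF)'),
--     ('bank branch', 15, 'Bank'),
--     ('gas station', 0, 'Do not pursue'),
--     ('dry cleaner', 0, 'Do not pursue'),
--     ('crematorium', 0, 'Do not pursue'),
--     ('flex space', 88, 'Flex / light industrial (with HVAC)'),
--     ('strip mall', 75, 'Medical office / retail strip center'),
--     ('megachurch', 38, 'Large church / worship center'),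
--     ('cold shell', 35, 'Warehouse without HVAC'),
--     ('night club', 32, 'Nightclub / large bar'),
--     ('auditorium', 28, 'Large assembly / cold storage'),
--     ('skyscraper', 20, 'High-rise 7+ stories (cap)'),
--     ('restaurant', 12, 'Restaurant'),
--     ('paint shop', 0, 'Do not pursue'),
--     ('strip club', 0, 'Do not pursue'),
--     ('childcare', 95, 'Daycare / childcare'),
--     ('preschool', 95, 'Daycare / childcare'),
--     ('cathedral', 38, 'Large church / worship center'),
--     ('warehouse', 35, 'Warehouse without HVAC'),
--     ('nightclub', 32, 'Nightclub / large bar'),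
--     ('large bar', 32, 'Nightclub / large bar'),
--     ('high-rise', 20, 'High-rise 7+ stories (cap)'),
--     ('high rise', 20, 'High-rise 7+ stories (cap)'),
--     ('petroleum', 0, 'Do not pursue'),
--     ('dry clean', 0, 'Do not pursue'),
--     ('auto body', 0, 'Do not pursue'),
--     ('body shop', 0, 'Do not pursue'),
--     ('crossfit', 90, 'Gym / fitness center'),
--     ('landmark', 30, 'Historic / landmark building'),
--     ('10-story', 20, 'High-rise 7+ stories (cap)'),
--     ('10 story', 20, 'High-rise 7+ stories (cap)'),
--     ('hospital', 18, 'Hospital / nursing home'),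
--     ('mortuary', 0, 'Do not pursue'),
--     ('daycare', 95, 'Daycare / childcare'),
--     ('4-story', 42, 'High-rise 4–6 stories (cap)'),
--     ('5-story', 42, 'High-rise 4–6 stories (cap)'),
--     ('6-story', 42, 'High-rise 4–6 stories (cap)'),
--     ('4 story', 42, 'High-rise 4–6 stories (cap)'),
--     ('5 story', 42, 'High-rise 4–6 stories (cap)'),
--     ('6 story', 42, 'High-rise 4–6 stories (cap)'),
--     ('theater', 28, 'Large assembly / cold storage'),
--     ('big box', 22, 'Big box retail (100k+ SF)'),
--     ('walmart', 22, 'Big box retail (100k+ SF)'),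
--     ('7-story', 20, 'High-rise 7+ stories (cap)'),
--     ('8-story', 20, 'High-rise 7+ stories (cap)'),
--     ('9-story', 20, 'High-rise 7+ stories (cap)'),
--     ('7 story', 20, 'High-rise 7+ stories (cap)'),
--     ('8 story', 20, 'High-rise 7+ stories (cap)'),
--     ('9 story', 20, 'High-rise 7+ stories (cap)'),
--     ('chapel', 78, 'Small / mid-size church'),
--     ('dental', 75, 'Medical office / retail strip center'),
--     ('clinic', 75, 'Medical office / retail strip center'),
--     ('temple', 38, 'Large church / worship center'),
--     ('mosque', 38, 'Large church / worship center'),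
--     ('church', 38, 'Large church / worship center'),
--     ('lounge', 32, 'Nightclub / large bar'),
--     ('cinema', 28, 'Large assembly / cold storage'),
--     ('target', 22, 'Big box retail (100k+ SF)'),
--     ('costco', 22, 'Big box retail (100k+ SF)'),
--     ('bistro', 12, 'Restaurant'),
--     ('prison', 0, 'Do not pursue'),
--     ('pre-k', 95, 'Daycare / childcare'),
--     ('tower', 20, 'High-rise 7+ stories (cap)'),
--     ('diner', 12, 'Restaurant'),
--     ('grill', 12, 'Restaurant'),
--     ('k-12', 100, 'Current K-12 school'),
--     ('shpo', 30, 'Historic / landmark building'),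
--     ('bank', 15, 'Bank'),
--     ('cafe', 12, 'Restaurant'),
--     ('jail', 0, 'Do not pursue'),
--     ('gym', 90, 'Gym / fitness center'),
-- ]
--
--
-- def _match_building_type(description: str) -> tuple[int, str]:
--     """Return (base_score, label): first (= longest, table-order tie-break) keyword
--     of the descending-length index that occurs in the description."""
--     desc = description.lower()
--     for kw, score, label in _FLAT_SORTED:
--         if kw in desc:
--             return score, label
--     return 75, "Office \u2014 general (default)"
-- ===== Notes on version B (the rewrite author's own statement) =====
-- stated objective: alternative
-- what changed: Replaces the best-so-far accumulator over the nested table with a precomputed flat index of (keyword, score, label) triples stably sorted by descending keyword length, scanned once with an early return at the first substring match.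
import Mathlib
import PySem

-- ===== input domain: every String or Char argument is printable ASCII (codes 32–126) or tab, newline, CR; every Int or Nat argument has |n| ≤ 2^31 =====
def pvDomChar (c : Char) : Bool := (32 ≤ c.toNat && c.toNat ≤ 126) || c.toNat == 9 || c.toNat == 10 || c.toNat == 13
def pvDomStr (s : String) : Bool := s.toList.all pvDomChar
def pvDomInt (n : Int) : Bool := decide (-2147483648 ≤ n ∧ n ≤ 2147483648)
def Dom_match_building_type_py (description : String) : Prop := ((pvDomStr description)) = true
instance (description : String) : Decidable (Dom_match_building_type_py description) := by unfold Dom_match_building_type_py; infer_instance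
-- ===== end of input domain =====

-- ===== PORT A =====
-- B replaces A's best-so-far accumulator over the nested table with a precomputed flat
-- (keyword, score, label) index stably sorted by descending keyword length, scanned once
-- with an early return at the first substring match; objective: alternative, same cost.

-- module constant _EOCCUPANCY_BUILDING_TYPES : (score, label, keywords)
def bt_table : List (Int × String × List String) := [
  (100, "Current K-12 school", ["k-12", "elementary school", "middle school", "high school", "existing school"]),
  (95, "Daycare / childcare", ["daycare", "childcare", "preschool", "pre-k"]),
  (92, "Office 1–3 stories", ["1-story office", "2-story office", "3-story office", "1 story office", "2 story office", "3 story office", "low-rise office", "single story office", "single-story office"]),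
  (90, "Gym / fitness center", ["gym", "fitness center", "health club", "yoga studio", "crossfit"]),
  (88, "Flex / light industrial (with HVAC)", ["flex space", "light industrial with hvac", "warehouse office", "flex industrial", "light industrial (with hvac)"]),
  (85, "Retail strip — individual unit", ["strip mall unit", "retail unit", "individual retail"]),
  (82, "Office — general", ["office building", "professional office", "corporate office", "general office"]),
  (78, "Small / mid-size church", ["small church", "community church", "chapel"]),
  (75, "Medical office / retail strip center", ["medical office", "dental office", "dental", "clinic", "urgent care", "retail strip center", "strip mall", "shopping center", "strip center"]),
  (58, "Warehouse with HVAC", ["warehouse with hvac", "conditioned warehouse", "climate controlled warehouse", "heated warehouse"]),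
  (55, "Small assembly venue", ["event space", "banquet hall", "small assembly", "small theater", "assembly venue"]),
  (42, "High-rise 4–6 stories (cap)", ["4-story", "5-story", "6-story", "4 story", "5 story", "6 story"]),
  (38, "Large church / worship center", ["large church", "megachurch", "cathedral", "temple", "mosque", "worship center", "church"]),
  (35, "Warehouse without HVAC", ["warehouse", "cold shell", "distribution center"]),
  (32, "Nightclub / large bar", ["nightclub", "large bar", "night club", "lounge"]),
  (30, "Historic / landmark building", ["historic building", "landmark", "national register", "shpo"]),
  (28, "Large assembly / cold storage", ["theater", "concert hall", "auditorium", "cinema", "cold storage", "freezer storage", "movie theater"]),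
  (25, "Data center", ["data center", "server farm"]),
  (22, "Big box retail (100k+ SF)", ["big box", "walmart", "target", "costco", "mall anchor", "anchor store"]),
  (20, "High-rise 7+ stories (cap)", ["7-story", "8-story", "9-story", "10-story", "7 story", "8 story", "9 story", "10 story", "high-rise", "high rise", "skyscraper", "tower"]),
  (18, "Hospital / nursing home", ["hospital", "medical center", "surgical center", "nursing home", "assisted living"]),
  (15, "Bank", ["bank branch", "credit union", "bank"]),
  (12, "Restaurant", ["restaurant", "cafe", "diner", "bistro", "grill", "food service"]),
  (0, "Do not pursue", ["gas station", "fuel station", "petroleum", "fueling station", "dry cleaner", "dry clean", "perchloroethylene", "auto body", "collision repair", "body shop", "paint shop", "heavy manufacturing", "manufacturing plant", "industrial plant", "fabrication plant", "chemical storage", "hazmat storage", "mortuary", "funeral home", "crematorium", "adult entertainment", "strip club", "jail", "prison", "detention center", "correctional"]) ]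

-- state = (best_score, best_label, best_len), exactly A's three accumulators
def match_building_type_py (description : String) : Int × String :=
  let desc := PySem.Str.lower description
  let st : Option Int × String × Int :=
    bt_table.foldl (fun st entry =>
      entry.2.2.foldl (fun st kw =>
        if PySem.Str.isIn kw desc && decide (st.2.2 < PySem.Str.len kw) then
          (some entry.1, entry.2.1, PySem.Str.len kw)
        else st) st) (none, "", 0)
  match st.1 with
  | none => (75, "Office — general (default)")
  | some s => (s, st.2.1)

-- ===== PORT B =====
-- Source B's _FLAT_SORTED: the precomputed descending-keyword-length index, verbatim
def bt_index : List (String × Int × String) := [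
  ("light industrial (with hvac)", 88, "Flex / light industrial (with HVAC)"),
  ("climate controlled warehouse", 58, "Warehouse with HVAC"),
  ("light industrial with hvac", 88, "Flex / light industrial (with HVAC)"),
  ("conditioned warehouse", 58, "Warehouse with HVAC"),
  ("single story office", 92, "Office 1–3 stories"),
  ("single-story office", 92, "Office 1–3 stories"),
  ("professional office", 82, "Office — general"),
  ("retail strip center", 75, "Medical office / retail strip center"),
  ("warehouse with hvac", 58, "Warehouse with HVAC"),
  ("distribution center", 35, "Warehouse without HVAC"),
  ("heavy manufacturing", 0, "Do not pursue"),
  ("manufacturing plant", 0, "Do not pursue"),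
  ("adult entertainment", 0, "Do not pursue"),
  ("elementary school", 100, "Current K-12 school"),
  ("individual retail", 85, "Retail strip — individual unit"),
  ("historic building", 30, "Historic / landmark building"),
  ("national register", 30, "Historic / landmark building"),
  ("perchloroethylene", 0, "Do not pursue"),
  ("fabrication plant", 0, "Do not pursue"),
  ("warehouse office", 88, "Flex / light industrial (with HVAC)"),
  ("corporate office", 82, "Office — general"),
  ("community church", 78, "Small / mid-size church"),
  ("heated warehouse", 58, "Warehouse with HVAC"),
  ("collision repair", 0, "Do not pursue"),
  ("industrial plant", 0, "Do not pursue"),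
  ("chemical storage", 0, "Do not pursue"),
  ("detention center", 0, "Do not pursue"),
  ("existing school", 100, "Current K-12 school"),
  ("low-rise office", 92, "Office 1–3 stories"),
  ("flex industrial", 88, "Flex / light industrial (with HVAC)"),
  ("strip mall unit", 85, "Retail strip — individual unit"),
  ("office building", 82, "Office — general"),
  ("shopping center", 75, "Medical office / retail strip center"),
  ("freezer storage", 28, "Large assembly / cold storage"),
  ("surgical center", 18, "Hospital / nursing home"),
  ("assisted living", 18, "Hospital / nursing home"),
  ("fueling station", 0, "Do not pursue"),
  ("1-story office", 92, "Office 1–3 stories"),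
  ("2-story office", 92, "Office 1–3 stories"),
  ("3-story office", 92, "Office 1–3 stories"),
  ("1 story office", 92, "Office 1–3 stories"),
  ("2 story office", 92, "Office 1–3 stories"),
  ("3 story office", 92, "Office 1–3 stories"),
  ("fitness center", 90, "Gym / fitness center"),
  ("general office", 82, "Office — general"),
  ("medical office", 75, "Medical office / retail strip center"),
  ("small assembly", 55, "Small assembly venue"),
  ("assembly venue", 55, "Small assembly venue"),
  ("worship center", 38, "Large church / worship center"),
  ("medical center", 18, "Hospital / nursing home"),
  ("hazmat storage", 0, "Do not pursue"),
  ("middle school", 100, "Current K-12 school"),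
  ("dental office", 75, "Medical office / retail strip center"),
  ("small theater", 55, "Small assembly venue"),
  ("movie theater", 28, "Large assembly / cold storage"),
  ("small church", 78, "Small / mid-size church"),
  ("strip center", 75, "Medical office / retail strip center"),
  ("banquet hall", 55, "Small assembly venue"),
  ("large church", 38, "Large church / worship center"),
  ("concert hall", 28, "Large assembly / cold storage"),
  ("cold storage", 28, "Large assembly / cold storage"),
  ("anchor store", 22, "Big box retail (100k+ SF)"),
  ("nursing home", 18, "Hospital / nursing home"),
  ("credit union", 15, "Bank"),
  ("food service", 12, "Restaurant"),
  ("fuel station", 0, "Do not pursue"),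
  ("funeral home", 0, "Do not pursue"),
  ("correctional", 0, "Do not pursue"),
  ("high school", 100, "Current K-12 school"),
  ("health club", 90, "Gym / fitness center"),
  ("yoga studio", 90, "Gym / fitness center"),
  ("retail unit", 85, "Retail strip — individual unit"),
  ("urgent care", 75, "Medical office / retail strip center"),
  ("event space", 55, "Small assembly venue"),
  ("data center", 25, "Data center"),
  ("server farm", 25, "Data center"),
  ("mall anchor", 22, "Big box retail (100k+ SF)"),
  ("bank branch", 15, "Bank"),
  ("gas station", 0, "Do not pursue"),
  ("dry cleaner", 0, "Do not pursue"),
  ("crematorium", 0, "Do not pursue"),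
  ("flex space", 88, "Flex / light industrial (with HVAC)"),
  ("strip mall", 75, "Medical office / retail strip center"),
  ("megachurch", 38, "Large church / worship center"),
  ("cold shell", 35, "Warehouse without HVAC"),
  ("night club", 32, "Nightclub / large bar"),
  ("auditorium", 28, "Large assembly / cold storage"),
  ("skyscraper", 20, "High-rise 7+ stories (cap)"),
  ("restaurant", 12, "Restaurant"),
  ("paint shop", 0, "Do not pursue"),
  ("strip club", 0, "Do not pursue"),
  ("childcare", 95, "Daycare / childcare"),
  ("preschool", 95, "Daycare / childcare"),
  ("cathedral", 38, "Large church / worship center"),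
  ("warehouse", 35, "Warehouse without HVAC"),
  ("nightclub", 32, "Nightclub / large bar"),
  ("large bar", 32, "Nightclub / large bar"),
  ("high-rise", 20, "High-rise 7+ stories (cap)"),
  ("high rise", 20, "High-rise 7+ stories (cap)"),
  ("petroleum", 0, "Do not pursue"),
  ("dry clean", 0, "Do not pursue"),
  ("auto body", 0, "Do not pursue"),
  ("body shop", 0, "Do not pursue"),
  ("crossfit", 90, "Gym / fitness center"),
  ("landmark", 30, "Historic / landmark building"),
  ("10-story", 20, "High-rise 7+ stories (cap)"),
  ("10 story", 20, "High-rise 7+ stories (cap)"),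
  ("hospital", 18, "Hospital / nursing home"),
  ("mortuary", 0, "Do not pursue"),
  ("daycare", 95, "Daycare / childcare"),
  ("4-story", 42, "High-rise 4–6 stories (cap)"),
  ("5-story", 42, "High-rise 4–6 stories (cap)"),
  ("6-story", 42, "High-rise 4–6 stories (cap)"),
  ("4 story", 42, "High-rise 4–6 stories (cap)"),
  ("5 story", 42, "High-rise 4–6 stories (cap)"),
  ("6 story", 42, "High-rise 4–6 stories (cap)"),
  ("theater", 28, "Large assembly / cold storage"),
  ("big box", 22, "Big box retail (100k+ SF)"),
  ("walmart", 22, "Big box retail (100k+ SF)"),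
  ("7-story", 20, "High-rise 7+ stories (cap)"),
  ("8-story", 20, "High-rise 7+ stories (cap)"),
  ("9-story", 20, "High-rise 7+ stories (cap)"),
  ("7 story", 20, "High-rise 7+ stories (cap)"),
  ("8 story", 20, "High-rise 7+ stories (cap)"),
  ("9 story", 20, "High-rise 7+ stories (cap)"),
  ("chapel", 78, "Small / mid-size church"),
  ("dental", 75, "Medical office / retail strip center"),
  ("clinic", 75, "Medical office / retail strip center"),
  ("temple", 38, "Large church / worship center"),
  ("mosque", 38, "Large church / worship center"),
  ("church", 38, "Large church / worship center"),
  ("lounge", 32, "Nightclub / large bar"),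
  ("cinema", 28, "Large assembly / cold storage"),
  ("target", 22, "Big box retail (100k+ SF)"),
  ("costco", 22, "Big box retail (100k+ SF)"),
  ("bistro", 12, "Restaurant"),
  ("prison", 0, "Do not pursue"),
  ("pre-k", 95, "Daycare / childcare"),
  ("tower", 20, "High-rise 7+ stories (cap)"),
  ("diner", 12, "Restaurant"),
  ("grill", 12, "Restaurant"),
  ("k-12", 100, "Current K-12 school"),
  ("shpo", 30, "Historic / landmark building"),
  ("bank", 15, "Bank"),
  ("cafe", 12, "Restaurant"),
  ("jail", 0, "Do not pursue"),
  ("gym", 90, "Gym / fitness center") ]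

-- Source B's loop: first triple whose keyword occurs in desc, else the default
def bScan (desc : String) : List (String × Int × String) → Int × String
  | [] => (75, "Office — general (default)")
  | t :: ts => if PySem.Str.isIn t.1 desc then (t.2.1, t.2.2) else bScan desc ts

def match_building_type_py_alt (description : String) : Int × String :=
  bScan (PySem.Str.lower description) bt_index

-- ===== PRECONDITION & SPEC =====
def Spec_match_building_type_py (description : String) (out : Int × String) : Prop := out = match_building_type_py_alt description
instance (description : String) (out : Int × String) : Decidable (Spec_match_building_type_py description out) := by unfold Spec_match_building_type_py; infer_instance

-- ===== CLAIM (what is proved, stated in full; the proofs are below) =====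
def Claim_equal_match_building_type_py : Prop := ∀ (description : String), Dom_match_building_type_py description → Spec_match_building_type_py description (match_building_type_py description)

-- ===== LEMMAS AND PROOFS =====

-- the table flattened to (keyword, score, label) in table order
def flatA : List (String × Int × String) :=
  bt_table.flatMap (fun e => e.2.2.map (fun kw => (kw, e.1, e.2.1)))

-- the distinct keyword lengths, descending
def lensDesc : List Int := [28, 26, 21, 19, 17, 16, 15, 14, 13, 12, 11, 10, 9, 8, 7, 6, 5, 4, 3]

-- A's loop body on a flattened triple
def stepA (desc : String) (st : Option Int × String × Int) (t : String × Int × String) :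
    Option Int × String × Int :=
  if PySem.Str.isIn t.1 desc && decide (st.2.2 < PySem.Str.len t.1) then
    (some t.2.1, t.2.2, PySem.Str.len t.1)
  else st

-- running maximum of matched keyword lengths, seeded with b
def mfold (desc : String) (l : List (String × Int × String)) (b : Int) : Int :=
  l.foldl (fun acc t => if PySem.Str.isIn t.1 desc then max acc (PySem.Str.len t.1) else acc) b

-- first triple with kw in desc and len kw = m, else the default
def firstAt (desc : String) (m : Int) : List (String × Int × String) → Int × String
  | [] => (75, "Office — general (default)")
  | t :: ts =>
    if PySem.Str.isIn t.1 desc && PySem.Str.len t.1 == m then (t.2.1, t.2.2)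
    else firstAt desc m ts

set_option maxRecDepth 100000 in
lemma bt_index_eq : bt_index
    = lensDesc.flatMap (fun d => flatA.filter (fun t => PySem.Str.len t.1 == d)) := by decide

set_option maxRecDepth 100000 in
lemma flatA_pos : ∀ t ∈ flatA, 0 < PySem.Str.len t.1 := by decide

set_option maxRecDepth 100000 in
lemma flatA_lens : ∀ t ∈ flatA, PySem.Str.len t.1 ∈ lensDesc := by decide

lemma lensDesc_sorted : lensDesc.Pairwise (· > ·) := by decide

lemma foldl_nested_eq_flat (desc : String) (l : List (Int × String × List String))
    (init : Option Int × String × Int) :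
    l.foldl (fun st entry =>
      entry.2.2.foldl (fun st kw =>
        if PySem.Str.isIn kw desc && decide (st.2.2 < PySem.Str.len kw) then
          (some entry.1, entry.2.1, PySem.Str.len kw)
        else st) st) init
    = (l.flatMap (fun e => e.2.2.map (fun kw => (kw, e.1, e.2.1)))).foldl (stepA desc) init := by
  induction l generalizing init with
  | nil => rfl
  | cons e t ih =>
    simp only [List.foldl_cons, List.flatMap_cons, List.foldl_append, List.foldl_map, ih, stepA]

lemma le_mfold (desc : String) (l : List (String × Int × String)) (b : Int) :
    b ≤ mfold desc l b := by
  induction l generalizing b with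
  | nil => simp [mfold]
  | cons t ts ih =>
    simp only [mfold, List.foldl_cons] at *
    split
    · exact le_trans (le_max_left _ _) (ih _)
    · exact ih b

lemma mfold_cons (desc : String) (t : String × Int × String) (ts : List (String × Int × String))
    (b : Int) :
    mfold desc (t :: ts) b
      = mfold desc ts (if PySem.Str.isIn t.1 desc then max b (PySem.Str.len t.1) else b) := by
  simp only [mfold, List.foldl_cons]

lemma mfold_ge (desc : String) (l : List (String × Int × String)) (b : Int) :
    ∀ t ∈ l, PySem.Str.isIn t.1 desc = true → PySem.Str.len t.1 ≤ mfold desc l b := by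
  induction l generalizing b with
  | nil => intro t ht; cases ht
  | cons u us ih =>
    intro t ht hm
    rw [mfold_cons]
    rcases List.mem_cons.mp ht with rfl | ht
    · rw [if_pos hm]
      exact le_trans (le_max_right _ _) (le_mfold _ _ _)
    · exact ih _ t ht hm

lemma mfold_attained (desc : String) (l : List (String × Int × String)) (b : Int)
    (h : mfold desc l b ≠ b) :
    ∃ t ∈ l, PySem.Str.isIn t.1 desc = true ∧ PySem.Str.len t.1 = mfold desc l b := by
  induction l generalizing b with
  | nil => exact absurd rfl h
  | cons u us ih =>
    rw [mfold_cons] at h ⊢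
    by_cases hc : PySem.Str.isIn u.1 desc
    · rw [if_pos hc] at h ⊢
      by_cases h2 : mfold desc us (max b (PySem.Str.len u.1)) = max b (PySem.Str.len u.1)
      · rw [h2] at h ⊢
        refine ⟨u, List.mem_cons_self, hc, ?_⟩
        have := le_mfold desc us (max b (PySem.Str.len u.1))
        omega
      · obtain ⟨t, ht, h3, h4⟩ := ih _ h2
        exact ⟨t, List.mem_cons_of_mem _ ht, h3, h4⟩
    · rw [if_neg hc] at h ⊢
      obtain ⟨t, ht, h3, h4⟩ := ih _ h
      exact ⟨t, List.mem_cons_of_mem _ ht, h3, h4⟩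

lemma mfold_zero_no_match (desc : String) (l : List (String × Int × String))
    (hpos : ∀ t ∈ l, 0 < PySem.Str.len t.1) (h : mfold desc l 0 = 0) :
    ∀ t ∈ l, PySem.Str.isIn t.1 desc = false := by
  intro t ht
  by_contra hc
  have hm : PySem.Str.isIn t.1 desc = true := by
    cases hv : PySem.Str.isIn t.1 desc
    · exact absurd hv hc
    · rfl
  have := mfold_ge desc l 0 t ht hm
  have := hpos t ht
  omega

lemma stepA_skip (desc : String) (st : Option Int × String × Int) (t : String × Int × String)
    (h : (PySem.Str.isIn t.1 desc && decide (st.2.2 < PySem.Str.len t.1)) = false) :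
    stepA desc st t = st := by
  unfold stepA; rw [h]; rfl

lemma stepA_take (desc : String) (st : Option Int × String × Int) (t : String × Int × String)
    (h : (PySem.Str.isIn t.1 desc && decide (st.2.2 < PySem.Str.len t.1)) = true) :
    stepA desc st t = (some t.2.1, t.2.2, PySem.Str.len t.1) := by
  unfold stepA; rw [h]; rfl

lemma firstAt_skip (desc : String) (m : Int) (t : String × Int × String)
    (ts : List (String × Int × String))
    (h : (PySem.Str.isIn t.1 desc && (PySem.Str.len t.1 == m)) = false) :
    firstAt desc m (t :: ts) = firstAt desc m ts := by
  simp only [firstAt]; rw [h]; rfl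

lemma firstAt_take (desc : String) (m : Int) (t : String × Int × String)
    (ts : List (String × Int × String))
    (h : (PySem.Str.isIn t.1 desc && (PySem.Str.len t.1 == m)) = true) :
    firstAt desc m (t :: ts) = (t.2.1, t.2.2) := by
  simp only [firstAt]; rw [h]; rfl

lemma foldA_stay (desc : String) (l : List (String × Int × String)) (s : Option Int)
    (lab : String) (b : Int) (h : mfold desc l b = b) :
    l.foldl (stepA desc) (s, lab, b) = (s, lab, b) := by
  induction l generalizing s lab b with
  | nil => rfl
  | cons t ts ih =>
    rw [mfold_cons] at h
    by_cases hc : PySem.Str.isIn t.1 desc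
    · by_cases hlt : b < PySem.Str.len t.1
      · exfalso
        have h1 := le_mfold desc ts (if PySem.Str.isIn t.1 desc then max b (PySem.Str.len t.1) else b)
        rw [h] at h1
        rw [if_pos hc] at h1
        have := le_max_right b (PySem.Str.len t.1)
        omega
      · have hb : (if PySem.Str.isIn t.1 desc then max b (PySem.Str.len t.1) else b) = b := by
          rw [if_pos hc]; omega
        rw [hb] at h
        rw [List.foldl_cons, stepA_skip desc _ t (by rw [decide_eq_false hlt, Bool.and_false])]
        exact ih s lab b h
    · rw [if_neg hc] at h
      rw [List.foldl_cons, stepA_skip desc _ t (by rw [Bool.eq_false_iff.mpr hc, Bool.false_and])]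
      exact ih s lab b h

lemma foldA_core (desc : String) (l : List (String × Int × String)) (b : Int) (s : Option Int)
    (lab : String) (h : b < mfold desc l b) :
    l.foldl (stepA desc) (s, lab, b)
      = (some (firstAt desc (mfold desc l b) l).1, (firstAt desc (mfold desc l b) l).2,
         mfold desc l b) := by
  induction l generalizing b s lab with
  | nil => simp [mfold] at h
  | cons t ts ih =>
    rw [mfold_cons] at h ⊢
    by_cases hc : PySem.Str.isIn t.1 desc
    · rw [if_pos hc] at h ⊢
      by_cases hlt : b < PySem.Str.len t.1
      · have hmax : max b (PySem.Str.len t.1) = PySem.Str.len t.1 := by omega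
        rw [hmax] at h ⊢
        rw [List.foldl_cons, stepA_take desc _ t (by rw [hc, decide_eq_true hlt]; rfl)]
        by_cases h2 : PySem.Str.len t.1 < mfold desc ts (PySem.Str.len t.1)
        · rw [ih _ _ _ h2]
          rw [firstAt_skip desc _ t ts (by
            have hne : (PySem.Str.len t.1 == mfold desc ts (PySem.Str.len t.1)) = false := by
              simp only [beq_eq_false_iff_ne, ne_eq]; omega
            rw [hne, Bool.and_false])]
        · have heq : mfold desc ts (PySem.Str.len t.1) = PySem.Str.len t.1 := by
            have := le_mfold desc ts (PySem.Str.len t.1); omega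
          rw [foldA_stay desc ts _ _ _ heq, heq]
          rw [firstAt_take desc _ t ts (by rw [hc, beq_self_eq_true]; rfl)]
      · have hmax : max b (PySem.Str.len t.1) = b := by omega
        rw [hmax] at h ⊢
        rw [List.foldl_cons, stepA_skip desc _ t (by rw [decide_eq_false hlt, Bool.and_false]),
          ih _ _ _ h]
        rw [firstAt_skip desc _ t ts (by
          have hne : (PySem.Str.len t.1 == mfold desc ts b) = false := by
            simp only [beq_eq_false_iff_ne, ne_eq]; omega
          rw [hne, Bool.and_false])]
    · rw [if_neg hc] at h ⊢
      rw [List.foldl_cons, stepA_skip desc _ t (by rw [Bool.eq_false_iff.mpr hc, Bool.false_and]),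
        ih _ _ _ h]
      rw [firstAt_skip desc _ t ts (by rw [Bool.eq_false_iff.mpr hc, Bool.false_and])]

lemma bScan_pos (desc : String) (t : String × Int × String) (ts : List (String × Int × String))
    (h : PySem.Str.isIn t.1 desc = true) : bScan desc (t :: ts) = (t.2.1, t.2.2) := by
  simp only [bScan]; rw [h]; rfl

lemma bScan_neg (desc : String) (t : String × Int × String) (ts : List (String × Int × String))
    (h : PySem.Str.isIn t.1 desc = false) : bScan desc (t :: ts) = bScan desc ts := by
  simp only [bScan]; rw [h]; rfl

lemma bScan_append (desc : String) (xs ys : List (String × Int × String)) :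
    bScan desc (xs ++ ys)
      = if xs.any (fun t => PySem.Str.isIn t.1 desc) then bScan desc xs else bScan desc ys := by
  induction xs with
  | nil => simp
  | cons t ts ih =>
    rw [List.cons_append]
    cases hc : PySem.Str.isIn t.1 desc
    · rw [bScan_neg desc t (ts ++ ys) hc, ih, List.any_cons, hc, Bool.false_or,
        bScan_neg desc t ts hc]
    · rw [bScan_pos desc t (ts ++ ys) hc, List.any_cons, hc, Bool.true_or, if_pos rfl,
        bScan_pos desc t ts hc]

lemma bScan_filter_eq_firstAt (desc : String) (m : Int) (l : List (String × Int × String)) :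
    bScan desc (l.filter (fun t => PySem.Str.len t.1 == m)) = firstAt desc m l := by
  induction l with
  | nil => rfl
  | cons t ts ih =>
    rw [List.filter_cons]
    by_cases hl : (PySem.Str.len t.1 == m) = true
    · rw [if_pos hl]
      cases hc : PySem.Str.isIn t.1 desc
      · rw [bScan_neg desc t _ hc, firstAt_skip desc m t ts (by rw [hc, Bool.false_and]), ih]
      · rw [bScan_pos desc t _ hc, firstAt_take desc m t ts (by rw [hc, hl]; rfl)]
    · have hl' : (PySem.Str.len t.1 == m) = false := Bool.eq_false_iff.mpr hl
      rw [if_neg hl, firstAt_skip desc m t ts (by rw [hl', Bool.and_false]), ih]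

lemma any_filter_len (desc : String) (m : Int) (l : List (String × Int × String))
    (h : ∃ t ∈ l, PySem.Str.isIn t.1 desc = true ∧ PySem.Str.len t.1 = m) :
    (l.filter (fun t => PySem.Str.len t.1 == m)).any (fun t => PySem.Str.isIn t.1 desc) = true := by
  obtain ⟨t, ht, h1, h2⟩ := h
  refine List.any_eq_true.mpr ⟨t, List.mem_filter.mpr ⟨ht, by rw [h2]; exact beq_self_eq_true m⟩, h1⟩

lemma no_match_filter_gt (desc : String) (m d : Int) (l : List (String × Int × String))
    (hbound : ∀ t ∈ l, PySem.Str.isIn t.1 desc = true → PySem.Str.len t.1 ≤ m) (hgt : m < d) :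
    (l.filter (fun t => PySem.Str.len t.1 == d)).any (fun t => PySem.Str.isIn t.1 desc) = false := by
  rw [List.any_eq_false]
  intro t ht
  have h1 := List.mem_filter.mp ht
  have h2 : PySem.Str.len t.1 = d := by simpa using h1.2
  cases hv : PySem.Str.isIn t.1 desc
  · simp
  · have := hbound t h1.1 hv
    omega

lemma bScan_blocks (desc : String) (m : Int) (l : List (String × Int × String))
    (ds : List Int) (hds : ds.Pairwise (· > ·)) (hm : m ∈ ds)
    (hbound : ∀ t ∈ l, PySem.Str.isIn t.1 desc = true → PySem.Str.len t.1 ≤ m)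
    (hex : ∃ t ∈ l, PySem.Str.isIn t.1 desc = true ∧ PySem.Str.len t.1 = m) :
    bScan desc (ds.flatMap (fun d => l.filter (fun t => PySem.Str.len t.1 == d)))
      = firstAt desc m l := by
  induction ds with
  | nil => cases hm
  | cons d rest ih =>
    obtain ⟨hhead, htail⟩ := List.pairwise_cons.mp hds
    rw [List.flatMap_cons, bScan_append]
    by_cases hd : d = m
    · subst hd
      rw [if_pos (any_filter_len desc d l hex)]
      exact bScan_filter_eq_firstAt desc d l
    · have hmr : m ∈ rest := by
        rcases List.mem_cons.mp hm with heq | hmr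
        · exact absurd heq.symm hd
        · exact hmr
      rw [no_match_filter_gt desc m d l hbound (hhead m hmr), if_neg Bool.false_ne_true]
      exact ih htail hmr

lemma bScan_no_match (desc : String) (l : List (String × Int × String))
    (h : ∀ t ∈ l, PySem.Str.isIn t.1 desc = false) :
    bScan desc l = (75, "Office — general (default)") := by
  induction l with
  | nil => rfl
  | cons t ts ih =>
    rw [bScan_neg desc t ts (h t List.mem_cons_self)]
    exact ih (fun x hx => h x (List.mem_cons_of_mem _ hx))

-- ===== VERDICT (by name: the statement is the Claim_ definition above) =====
theorem match_building_type_py_spec : Claim_equal_match_building_type_py := by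
  intro description _
  unfold Spec_match_building_type_py match_building_type_py match_building_type_py_alt
  simp only []
  set desc := PySem.Str.lower description with hdesc
  rw [foldl_nested_eq_flat desc bt_table (none, "", 0), bt_index_eq]
  show (match (flatA.foldl (stepA desc) (none, "", (0 : Int))).1 with
        | none => ((75 : Int), "Office — general (default)")
        | some s => (s, (flatA.foldl (stepA desc) (none, "", (0 : Int))).2.1))
      = bScan desc (lensDesc.flatMap (fun d => flatA.filter (fun t => PySem.Str.len t.1 == d)))
  rcases lt_or_eq_of_le (le_mfold desc flatA 0) with h | h
  · rw [foldA_core desc flatA 0 none "" h]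
    have hm : mfold desc flatA 0 ≠ 0 := by omega
    obtain ⟨t, ht, h1, h2⟩ := mfold_attained desc flatA 0 hm
    rw [bScan_blocks desc (mfold desc flatA 0) flatA lensDesc lensDesc_sorted
      (h2 ▸ flatA_lens t ht) (mfold_ge desc flatA 0) ⟨t, ht, h1, h2⟩]
  · rw [foldA_stay desc flatA none "" 0 h.symm]
    rw [bScan_no_match desc _ (by
      intro t ht
      obtain ⟨u, hu, hue⟩ := List.mem_flatMap.mp ht
      exact mfold_zero_no_match desc flatA flatA_pos h.symm t (List.mem_of_mem_filter hue))]
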